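-- pv_equiv track=rewrite | github.com/stxrm-cc/game-play | misc/python/chocolat v1.5.py | EvalMinimax
-- ===== SOURCE A (Python) =====
-- from copy import deepcopy
--
-- def Remplace(x,y,gridModifie):
--     """
--     f( int , int , list ) -> list
--     retourne la liste entree en argument en lui changeant la ligne x
--     (en argument)et la colonne (y en argument) en 0"""
--     # remplace a droite de la position jouer en (x;y)
--     save = gridModifie[y-1]
--     for i in range(len(save)):
--         if i+1 >= x:
--             save[i] = 0
--     gridModifie[y-1] = save
--
--     # remplace en bas de la position jouer en (x;y)
--     for i in range(y):
--         save = gridModifie[i]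
--         save[x-1] = 0
--         gridModifie[i] = save
--     return gridModifie
--
-- def EvalMinimax(Evaluation):
--     """
--     f( list ) -> list
--     retourne toutes les position possible de jouer au coup suivant
--     (fait pour evaluer les possibilites de l'IA)"""
--     newPosition = []
--     for loop1 in range(len(Evaluation)):
--         EvalX = Evaluation[loop1]
--         for loop2 in range(len(EvalX)):
--             if EvalX[loop2] != 0:
--                 # calcul le prochain coup
--                 newPosition += [Remplace(loop2+1,loop1+1,deepcopy(Evaluation))]
--     return newPosition
-- ===== SOURCE B (Python) =====
-- def EvalMinimax(Evaluation):
--     """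
--     f( list ) -> list
--     Structural recursion over the rows instead of index loops: go(rows)
--     returns, for every nonzero cell of the suffix `rows`, the pair
--     (played column, successor suffix).  A move in the head row truncates
--     the head to zeros from that column; a move coming back from the
--     recursion on the tail zeroes the head's entry in the played column.
--     No deepcopy, no mutating helper, no row/column indices."""
--     def zero_from(row, c):
--         return [0 if j >= c else w for j, w in enumerate(row)]
--     def zero_at(row, c):
--         h = list(row)
--         h[c] = 0
--         return h
--     def go(rows):
--         if not rows:
--             return []
--         head, tail = rows[0], rows[1:]
--         own = [(c, [zero_from(head, c)] + tail)
--                for c, v in enumerate(head) if v != 0]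
--         rec = [(c, [zero_at(head, c)] + succ) for c, succ in go(tail)]
--         return own + rec
--     return [grid for _, grid in go(Evaluation)]
-- ===== Notes on version B (the rewrite author's own statement) =====
-- stated objective: alternative
-- what changed: B replaces A's index loops with deepcopy+mutating Remplace by a structural recursion over the rows: go(rows) returns (played column, successor suffix) pairs for every nonzero cell of the suffix, a head move truncates the head row from the played column, and successors returned from the tail get the head prepended with that column's entry zeroed.
import Mathlib
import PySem

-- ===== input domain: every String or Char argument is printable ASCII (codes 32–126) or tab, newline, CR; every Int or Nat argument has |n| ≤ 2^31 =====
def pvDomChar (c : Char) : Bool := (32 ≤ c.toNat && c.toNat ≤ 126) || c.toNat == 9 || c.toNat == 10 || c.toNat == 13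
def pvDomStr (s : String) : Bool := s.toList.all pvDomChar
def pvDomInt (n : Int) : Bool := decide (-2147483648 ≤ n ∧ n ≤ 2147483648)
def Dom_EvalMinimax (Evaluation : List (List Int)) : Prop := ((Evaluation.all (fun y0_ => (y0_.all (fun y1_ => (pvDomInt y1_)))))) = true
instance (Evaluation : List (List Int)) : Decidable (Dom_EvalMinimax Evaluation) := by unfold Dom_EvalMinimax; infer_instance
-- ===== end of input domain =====

-- B replaces A's index loops + deepcopy + mutating Remplace by a structural recursion over the
-- rows that threads successor suffixes back up (objective: alternative decomposition).
-- Return-value equivalence only: A mutates (only) the deep copies it makes, never its argument.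

-- ===== PORT A =====
-- Port of `Remplace`. Python writes `save[i] = 0` / `save[x-1] = 0` in place; the port uses
-- `List.set`, which is a no-op on an out-of-range index — exactly the inputs where Python
-- raises IndexError, and those are excluded by `Pre_EvalMinimax`.
def Remplace (x y : Nat) (gridModifie : List (List Int)) : List (List Int) :=
  let save := gridModifie.getD (y-1) []
  let save := (List.range save.length).foldl
      (fun s i => if i+1 ≥ x then s.set i 0 else s) save
  let g := gridModifie.set (y-1) save
  (List.range y).foldl (fun g2 i => g2.set i ((g2.getD i []).set (x-1) 0)) g

def EvalMinimax (Evaluation : List (List Int)) : List (List (List Int)) :=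
  (List.range Evaluation.length).foldl (fun newPosition loop1 =>
    let EvalX := Evaluation.getD loop1 []
    (List.range EvalX.length).foldl (fun np loop2 =>
      if EvalX.getD loop2 0 ≠ 0 then np ++ [Remplace (loop2+1) (loop1+1) Evaluation]
      else np) newPosition) []

-- ===== PORT B =====
-- `zero_from`: the head row truncated to zeros from the played column on.
def zeroFrom (row : List Int) (c : Int) : List Int :=
  (PySem.List.enumerate row).map (fun jw => if c ≤ jw.1 then 0 else jw.2)

-- `zero_at`: Python `h[c] = 0` raises IndexError when c is out of range (excluded by
-- `Pre_EvalMinimax`); `List.set` is a no-op there. c comes from enumerate, so c ≥ 0.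
def zeroAt (row : List Int) (c : Int) : List Int := row.set c.toNat 0

-- `go`: for every nonzero cell of the suffix `rows`, the pair (played column, successor suffix).
def go : List (List Int) → List (Int × List (List Int))
  | [] => []
  | head :: tail =>
    ((PySem.List.enumerate head).filterMap (fun cv =>
      if cv.2 ≠ 0 then some (cv.1, zeroFrom head cv.1 :: tail) else none))
    ++ (go tail).map (fun cs => (cs.1, zeroAt head cs.1 :: cs.2))

def EvalMinimax_alt (Evaluation : List (List Int)) : List (List (List Int)) :=
  (go Evaluation).map Prod.snd

-- ===== PRECONDITION & SPEC =====
-- Pre_ excludes exactly the ragged grids on which A raises IndexError: a nonzero cell (r, c)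
-- such that some earlier row i < r is too short to have a column c.
def Pre_EvalMinimax (Evaluation : List (List Int)) : Prop :=
  ∀ r < Evaluation.length, ∀ c < (Evaluation.getD r []).length,
    (Evaluation.getD r []).getD c 0 ≠ 0 → ∀ i < r, c < (Evaluation.getD i []).length
instance (Evaluation : List (List Int)) : Decidable (Pre_EvalMinimax Evaluation) := by
  unfold Pre_EvalMinimax; infer_instance

def pvWitness_EvalMinimax : List (List Int) := [[1, 2], [3, 0]]

def Spec_EvalMinimax (Evaluation : List (List Int)) (out : List (List (List Int))) : Prop := out = EvalMinimax_alt Evaluation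
instance (Evaluation : List (List Int)) (out : List (List (List Int))) : Decidable (Spec_EvalMinimax Evaluation out) := by unfold Spec_EvalMinimax; infer_instance

-- ===== CLAIM (what is proved, stated in full; the proofs are below) =====
def Claim_equal_EvalMinimax : Prop := ∀ (Evaluation : List (List Int)), Dom_EvalMinimax Evaluation → Pre_EvalMinimax Evaluation → Spec_EvalMinimax Evaluation (EvalMinimax Evaluation)

-- ===== LEMMAS AND PROOFS =====

-- proof-only: the successor suffix, defined by the same recursion shape as `go` threads it.
def RS : List (List Int) → Nat → Nat → List (List Int)
  | [], _, _ => []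
  | h :: t, 0, c => zeroFrom h (c : Int) :: t
  | h :: t, r+1, c => zeroAt h (c : Int) :: RS t r c

-- `enumerate` as a map over `List.range` (index/value form used to align B with A's index loops).
lemma enumerate_eq_range_map {α : Type} (xs : List α) (d : α) :
    ∀ s : Int, PySem.List.enumerate xs s
      = (List.range xs.length).map (fun (i : Nat) => ((s + i : Int), xs.getD i d)) := by
  induction xs with
  | nil => intro s; simp [PySem.List.enumerate]
  | cons x xs ih =>
    intro s
    rw [PySem.List.enumerate_cons, ih (s + 1)]
    simp only [List.length_cons, List.range_succ_eq_map, List.map_cons, List.map_map]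
    refine List.cons_eq_cons.mpr ⟨by simp, ?_⟩
    apply List.map_congr_left
    intro i _
    simp only [Function.comp_apply, List.getD_cons_succ, Prod.mk.injEq]
    exact ⟨by push_cast; ring, trivial⟩

-- Step 1 of Remplace: zeroing row entries at indices ≥ c.
lemma zeroFrom_foldl (c : Nat) (n : Nat) : ∀ (s : List Int),
    (List.range n).foldl (fun s i => if i+1 ≥ c+1 then s.set i 0 else s) s
      = s.mapIdx (fun j w => if j < n ∧ c ≤ j then 0 else w) := by
  induction n with
  | zero => intro s; apply List.ext_getElem <;> simp
  | succ n ih =>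
    intro s
    rw [List.range_succ, List.foldl_append, List.foldl_cons, List.foldl_nil, ih s]
    by_cases hc : n + 1 ≥ c + 1
    · rw [if_pos hc]
      apply List.ext_getElem
      · simp
      · intro j h1 h2
        simp only [List.getElem_set, List.getElem_mapIdx]
        split_ifs <;> first | rfl | omega
    · rw [if_neg hc]
      apply List.ext_getElem
      · simp
      · intro j h1 h2
        simp only [List.getElem_mapIdx]
        split_ifs <;> first | rfl | omega

-- Step 2 of Remplace: zeroing column c of the first n rows.
lemma zeroCol_foldl (c : Nat) (n : Nat) : ∀ (g : List (List Int)),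
    (List.range n).foldl (fun g2 i => g2.set i ((g2.getD i []).set c 0)) g
      = g.mapIdx (fun i rw => if i < n then rw.set c 0 else rw) := by
  induction n with
  | zero => intro g; apply List.ext_getElem <;> simp
  | succ n ih =>
    intro g
    rw [List.range_succ, List.foldl_append, List.foldl_cons, List.foldl_nil, ih g]
    apply List.ext_getElem
    · simp
    · intro i h1 h2
      simp only [List.getElem_set, List.getElem_mapIdx]
      by_cases hn : n = i
      · subst hn
        have hlen : n < g.length := by simpa using h2
        rw [if_pos rfl, List.getD_eq_getElem _ _ (by simpa using hlen), List.getElem_mapIdx]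
        split_ifs <;> first | rfl | omega
      · rw [if_neg hn]
        split_ifs <;> first | rfl | omega

-- B's row helpers in mapIdx / set form.
lemma zeroFrom_cast (h : List Int) (c : Nat) :
    zeroFrom h (c : Int) = h.mapIdx (fun j w => if c ≤ j then 0 else w) := by
  unfold zeroFrom
  rw [enumerate_eq_range_map h 0, List.map_map]
  apply List.ext_getElem
  · simp
  · intro j h1 h2
    simp only [List.getElem_map, List.getElem_range, Function.comp_apply, zero_add,
      List.getElem_mapIdx]
    rw [List.getD_eq_getElem _ _ (by simpa using h2)]
    split_ifs with ha hb hb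
    · rfl
    · exact absurd (by exact_mod_cast ha) hb
    · exact absurd (by exact_mod_cast hb : (c : Int) ≤ j) ha
    · rfl

lemma zeroAt_cast (h : List Int) (c : Nat) : zeroAt h (c : Int) = h.set c 0 := by
  simp [zeroAt]

-- RS in mapIdx form.
lemma RS_eq_mapIdx : ∀ (E : List (List Int)) (r c : Nat),
    RS E r c = E.mapIdx (fun i rw =>
      if i = r then zeroFrom rw (c : Int) else if i < r then zeroAt rw (c : Int) else rw) := by
  intro E
  induction E with
  | nil => intro r c; rfl
  | cons h t ih =>
    intro r c
    cases r with
    | zero =>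
      simp only [RS, List.mapIdx_cons]
      refine List.cons_eq_cons.mpr ⟨rfl, ?_⟩
      apply List.ext_getElem
      · simp
      · intro i h1 h2
        simp
    | succ r =>
      simp only [RS, List.mapIdx_cons, ih r c]
      refine List.cons_eq_cons.mpr ⟨by simp, ?_⟩
      apply List.ext_getElem
      · simp
      · intro i h1 h2
        simp only [List.length_mapIdx] at h1 h2
        simp only [List.getElem_mapIdx]
        split_ifs <;> first | rfl | omega

-- A's Remplace equals B's threaded successor.
lemma remplace_eq_RS (E : List (List Int)) (r c : Nat) :
    Remplace (c+1) (r+1) E = RS E r c := by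
  rw [RS_eq_mapIdx]
  unfold Remplace
  simp only [Nat.add_sub_cancel]
  rw [zeroFrom_foldl, zeroCol_foldl]
  apply List.ext_getElem
  · simp only [List.length_mapIdx, List.length_set]
  · intro i h1 h2
    simp only [List.length_mapIdx, List.length_set] at h1 h2
    have hgetD : E.getD i [] = E[i] := List.getD_eq_getElem _ _ h1
    simp only [List.getElem_mapIdx, List.getElem_set]
    rcases Nat.lt_trichotomy i r with hlt | heq | hgt
    · rw [if_pos (by omega : i < r + 1), if_neg (by omega : ¬ r = i),
        if_neg (by omega : ¬ i = r), if_pos hlt, zeroAt_cast]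
    · subst heq
      rw [if_pos (by omega : i < i + 1), if_pos rfl, if_pos rfl, zeroFrom_cast]
      apply List.ext_getElem
      · simp only [List.length_set, List.length_mapIdx, hgetD]
      · intro j hj1 hj2
        simp only [List.length_set, List.length_mapIdx, hgetD] at hj1 hj2
        simp only [List.getElem_set, List.getElem_mapIdx, hgetD]
        split_ifs <;> first | rfl | omega
    · rw [if_neg (by omega : ¬ i < r + 1), if_neg (by omega : ¬ r = i),
        if_neg (by omega : ¬ i = r), if_neg (by omega : ¬ i < r)]

-- own moves of the head row: the filterMap over enumerate in flatMap form.
lemma own_eq (h : List Int) (t : List (List Int)) : ∀ l : List Nat,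
    ((l.map (fun i : Nat => ((i : Int), h.getD i 0))).filterMap (fun cv =>
        if cv.2 ≠ 0 then some (cv.1, zeroFrom h cv.1 :: t) else none))
      = l.flatMap (fun c => if h.getD c 0 ≠ 0 then [((c : Int), zeroFrom h (c : Int) :: t)] else []) := by
  intro l
  induction l with
  | nil => rfl
  | cons a l ih =>
    simp only [List.map_cons, List.filterMap_cons, List.flatMap_cons]
    by_cases ha : h.getD a 0 ≠ 0
    · simp only [if_pos ha]; rw [ih]; rfl
    · simp only [if_neg ha]; rw [ih]; rfl

-- B's recursion in row-major flatMap form.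
lemma go_eq (E : List (List Int)) :
    go E = (List.range E.length).flatMap (fun r =>
      (List.range (E.getD r []).length).flatMap (fun c =>
        if (E.getD r []).getD c 0 ≠ 0 then [((c : Int), RS E r c)] else [])) := by
  induction E with
  | nil => rfl
  | cons h t ih =>
    rw [go, ih]
    simp only [List.length_cons, List.range_succ_eq_map, List.flatMap_cons, List.flatMap_map,
      List.getD_cons_zero, List.getD_cons_succ]
    congr 1
    · -- own moves in the head row
      rw [enumerate_eq_range_map h 0]
      simp only [zero_add]
      rw [own_eq]
      apply List.flatMap_congr
      intro c _
      split_ifs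
      · rfl
      · rfl
    · -- moves from the tail, head prepended with the played column zeroed
      rw [List.map_flatMap]
      apply List.flatMap_congr
      intro r _
      rw [List.map_flatMap]
      apply List.flatMap_congr
      intro c _
      split_ifs
      · simp only [List.map_cons, List.map_nil, RS]
      · rfl

theorem evalMinimax_eq (E : List (List Int)) : EvalMinimax E = EvalMinimax_alt E := by
  unfold EvalMinimax EvalMinimax_alt
  -- inner loop of A: conditional append as append of a conditional list
  have h1 : ∀ l1 : Nat, ∀ np : List (List (List Int)),
      (List.range (E.getD l1 []).length).foldl (fun np loop2 =>
        if (E.getD l1 []).getD loop2 0 ≠ 0 then np ++ [Remplace (loop2+1) (l1+1) E] else np) np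
      = np ++ (List.range (E.getD l1 []).length).flatMap (fun loop2 =>
          if (E.getD l1 []).getD loop2 0 ≠ 0 then [Remplace (loop2+1) (l1+1) E] else []) := by
    intro l1 np
    rw [← PySem.List.foldl_append_eq_flatMap]
    apply PySem.List.foldl_congr_mem
    intro acc x _
    split_ifs <;> simp
  dsimp only
  rw [PySem.List.foldl_congr_mem _ _
      (fun np l1 => np ++ (List.range (E.getD l1 []).length).flatMap (fun loop2 =>
        if (E.getD l1 []).getD loop2 0 ≠ 0 then [Remplace (loop2+1) (l1+1) E] else [])) _
      (fun np l1 _ => h1 l1 np)]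
  rw [PySem.List.foldl_append_eq_flatMap]
  rw [List.nil_append]
  rw [go_eq, List.map_flatMap]
  apply List.flatMap_congr
  intro r _
  rw [List.map_flatMap]
  apply List.flatMap_congr
  intro c _
  split_ifs
  · simp [remplace_eq_RS]
  · rfl

-- ===== VERDICT (by name: the statement is the Claim_ definition above) =====
theorem EvalMinimax_spec : Claim_equal_EvalMinimax := by
  intro E _ _
  unfold Spec_EvalMinimax
  exact evalMinimax_eq E
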